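-- pv_equiv track=rewrite | github.com/tqtq-Wang/Aximo | compiler/ir/lowering.py | _split_outer_call
-- ===== SOURCE A (Python) =====
-- def _split_outer_call(text: str) -> tuple[str, str] | None:
--     if not text.endswith(")"):
--         return None
--     in_string = False
--     escape = False
--     depth = 0
--     open_index: int | None = None
--     for index, char in enumerate(text):
--         if in_string:
--             if escape:
--                 escape = False
--             elif char == "\\":
--                 escape = True
--             elif char == '"':
--                 in_string = False
--             continue
--         if char == '"':
--             in_string = True
--             continue
--         if char == "(":
--             if depth == 0:
--                 open_index = index
--             depth += 1
--             continue
--         if char == ")":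
--             depth -= 1
--             if depth == 0:
--                 if index != len(text) - 1 or open_index is None:
--                     return None
--                 callee = text[:open_index].strip()
--                 if not callee:
--                     return None
--                 return callee, text[open_index + 1 : -1]
--     return None
-- ===== SOURCE B (Python) =====
-- def _split_outer_call(text: str) -> tuple[str, str] | None:
--     if not text.endswith(")"):
--         return None
--     # pass 1: mark which positions are code (outside double-quoted string literals)
--     code = []
--     in_string = False
--     escape = False
--     for ch in text:
--         code.append(not in_string and ch != '"')
--         if in_string:
--             if escape:
--                 escape = False
--             elif ch == "\\":
--                 escape = True
--             elif ch == '"':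
--                 in_string = False
--         elif ch == '"':
--             in_string = True
--     # pass 2: bracket events on code positions only
--     events = [(i, 1 if ch == "(" else -1)
--               for i, (ch, m) in enumerate(zip(text, code))
--               if m and ch in "()"]
--     depth = 0
--     open_index = None
--     close_index = None
--     for i, d in events:
--         depth += d
--         if open_index is None and depth == 1:
--             open_index = i
--         if d < 0 and depth == 0:
--             close_index = i
--             break
--     if close_index != len(text) - 1 or open_index is None:
--         return None
--     callee = text[:open_index].strip()
--     if not callee:
--         return None
--     return callee, text[open_index + 1 : -1]
-- ===== Notes on version B (the rewrite author's own statement) =====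
-- stated objective: alternative
-- what changed: A's single fused state machine (string state + bracket depth + inline early returns) is split into two separately shaped passes: a string-literal mask pass, then a bracket-event list scanned with a depth counter and post-loop checks.
import Mathlib
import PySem

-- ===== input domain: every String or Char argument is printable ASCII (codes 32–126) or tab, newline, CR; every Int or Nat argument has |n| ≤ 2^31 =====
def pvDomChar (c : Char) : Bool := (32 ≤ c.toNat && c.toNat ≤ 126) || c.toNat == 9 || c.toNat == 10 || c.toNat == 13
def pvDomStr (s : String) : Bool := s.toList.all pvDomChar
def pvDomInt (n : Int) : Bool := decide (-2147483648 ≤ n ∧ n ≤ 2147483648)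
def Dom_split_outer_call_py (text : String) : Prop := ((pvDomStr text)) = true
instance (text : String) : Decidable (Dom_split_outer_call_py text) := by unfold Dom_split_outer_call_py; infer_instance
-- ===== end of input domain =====

-- B separates A's fused state machine into two passes — a string-literal mask, then a
-- bracket-event scan over code positions — same return value on every input (objective: alternative decomposition).

-- ===== PORT A =====
-- A's single loop over enumerate(text): string state (in_string, escape) fused with the
-- bracket depth counter; early returns become terminal results of the recursion.
def splitA_go (full : List Char) (n : Int) :
    List (Int × Char) → Bool → Bool → Int → Option Int → Option (String × String)
  | [], _, _, _, _ => none
  | (i, c) :: rest, inS, esc, depth, op =>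
    if inS then
      (if esc then splitA_go full n rest true false depth op
       else if c = '\\' then splitA_go full n rest true true depth op
       else if c = '"' then splitA_go full n rest false false depth op
       else splitA_go full n rest true false depth op)
    else if c = '"' then splitA_go full n rest true false depth op
    else if c = '(' then
      splitA_go full n rest false false (depth + 1) (if depth = 0 then some i else op)
    else if c = ')' then
      (if depth - 1 = 0 then
        (if i ≠ n - 1 then none
         else match op with
           | none => none
           | some oi =>
             let callee := PySem.Chars.strip (PySem.List.slice full none (some oi))
             if callee = [] then none
             else some (String.ofList callee, String.ofList (PySem.List.slice full (some (oi + 1)) (some (-1)))))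
       else splitA_go full n rest false false (depth - 1) op)
    else splitA_go full n rest false false depth op

def split_outer_call_py (text : String) : Option (String × String) :=
  if !(PySem.Str.endswith text ")") then none
  else
    splitA_go text.toList (PySem.List.len text.toList)
      (PySem.List.enumerate text.toList 0) false false 0 none

-- ===== PORT B =====
-- pass 1: which positions are code (outside double-quoted string literals)
def splitB_mask : List Char → Bool → Bool → List Bool
  | [], _, _ => []
  | c :: rest, inS, esc =>
    ((!inS) && !(c = '"')) ::
    (if inS then
       (if esc then splitB_mask rest true false
        else if c = '\\' then splitB_mask rest true true
        else if c = '"' then splitB_mask rest false false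
        else splitB_mask rest true false)
     else if c = '"' then splitB_mask rest true false
     else splitB_mask rest false false)

-- pass 2a: the bracket events [(index, ±1)] on code positions (the list comprehension)
def splitB_events (chars : List Char) (mask : List Bool) : List (Int × Int) :=
  (PySem.List.enumerate (chars.zip mask) 0).filterMap (fun p =>
    if p.2.2 && ((p.2.1 = '(') || (p.2.1 = ')')) then
      some (p.1, if p.2.1 = '(' then 1 else -1)
    else none)

-- pass 2b: scan the events, recording the first index where depth reaches 1 and
-- breaking at the first closing event that returns depth to 0
def splitB_scan : List (Int × Int) → Int → Option Int → Option Int × Option Int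
  | [], _, op => (op, none)
  | (i, d) :: rest, depth, op =>
    let depth' := depth + d
    let op' := if op = none ∧ depth' = 1 then some i else op
    if d < 0 ∧ depth' = 0 then (op', some i) else splitB_scan rest depth' op'

-- post-loop checks and the result
def splitB_post (chars : List Char) (n : Int) : Option Int × Option Int → Option (String × String)
  | (op, cl) =>
    if cl ≠ some (n - 1) then none
    else match op with
      | none => none
      | some oi =>
        let callee := PySem.Chars.strip (PySem.List.slice chars none (some oi))
        if callee = [] then none
        else some (String.ofList callee, String.ofList (PySem.List.slice chars (some (oi + 1)) (some (-1))))

def split_outer_call_py_alt (text : String) : Option (String × String) :=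
  if !(PySem.Str.endswith text ")") then none
  else
    let chars := text.toList
    let mask := splitB_mask chars false false
    splitB_post chars (PySem.List.len chars) (splitB_scan (splitB_events chars mask) 0 none)

-- ===== PRECONDITION & SPEC =====
def Spec_split_outer_call_py (text : String) (out : Option (String × String)) : Prop := out = split_outer_call_py_alt text
instance (text : String) (out : Option (String × String)) : Decidable (Spec_split_outer_call_py text out) := by unfold Spec_split_outer_call_py; infer_instance

-- ===== CLAIM (what is proved, stated in full; the proofs are below) =====
def Claim_equal_split_outer_call_py : Prop := ∀ (text : String), Dom_split_outer_call_py text → Spec_split_outer_call_py text (split_outer_call_py text)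

-- ===== LEMMAS AND PROOFS =====

-- proof-side recursive form of B's event list (events of a suffix, given start index and string state)
def pvEvts : List Char → Int → Bool → Bool → List (Int × Int)
  | [], _, _, _ => []
  | c :: rest, i, inS, esc =>
    if inS then
      (if esc then pvEvts rest (i + 1) true false
       else if c = '\\' then pvEvts rest (i + 1) true true
       else if c = '"' then pvEvts rest (i + 1) false false
       else pvEvts rest (i + 1) true false)
    else if c = '"' then pvEvts rest (i + 1) true false
    else if c = '(' then (i, 1) :: pvEvts rest (i + 1) false false
    else if c = ')' then (i, -1) :: pvEvts rest (i + 1) false false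
    else pvEvts rest (i + 1) false false

theorem pvEvts_eq :
    ∀ (chars : List Char) (s : Int) (inS esc : Bool),
      (PySem.List.enumerate (chars.zip (splitB_mask chars inS esc)) s).filterMap (fun p =>
          if p.2.2 && ((p.2.1 = '(') || (p.2.1 = ')')) then
            some (p.1, if p.2.1 = '(' then (1 : Int) else -1)
          else none) = pvEvts chars s inS esc := by
  intro chars
  induction chars with
  | nil => intro s inS esc; simp [splitB_mask, pvEvts]
  | cons c rest ih =>
    intro s inS esc
    simp only [splitB_mask, pvEvts, List.zip_cons_cons, PySem.List.enumerate_cons,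
      List.filterMap_cons]
    split_ifs <;> simp_all

theorem splitA_go_eq (full : List Char) (n : Int) :
    ∀ (chars : List Char) (s : Int) (inS esc : Bool) (depth : Int) (op : Option Int),
      (op = none → depth ≤ 0) → (op ≠ none → 1 ≤ depth) →
      splitA_go full n (PySem.List.enumerate chars s) inS esc depth op =
        splitB_post full n (splitB_scan (pvEvts chars s inS esc) depth op) := by
  intro chars
  induction chars with
  | nil =>
    intro s inS esc depth op _ _
    simp [splitA_go, pvEvts, splitB_scan, splitB_post, PySem.List.enumerate_nil]
  | cons c rest ih =>
    intro s inS esc depth op h1 h2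
    rw [PySem.List.enumerate_cons]
    cases inS with
    | true =>
      cases esc with
      | true =>
        simp only [splitA_go, pvEvts]
        exact ih _ _ _ _ _ h1 h2
      | false =>
        by_cases hb : c = '\\'
        · subst hb
          simp only [splitA_go, pvEvts]
          exact ih _ _ _ _ _ h1 h2
        · by_cases hq : c = '"'
          · subst hq
            simp only [splitA_go, pvEvts]
            exact ih _ _ _ _ _ h1 h2
          · simp only [splitA_go, pvEvts, if_neg hb, if_neg hq]
            exact ih _ _ _ _ _ h1 h2
    | false =>
      by_cases hq : c = '"'
      · subst hq
        simp only [splitA_go, pvEvts]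
        exact ih _ _ _ _ _ h1 h2
      · by_cases ho : c = '('
        · subst ho
          simp [splitA_go, pvEvts, splitB_scan]
          have harg : (if op = none ∧ depth = 0 then some s else op)
              = (if depth = 0 then some s else op) := by
            cases op with
            | none => simp
            | some x =>
              have h2' := h2 (by simp)
              rw [if_neg (by rintro ⟨hh, _⟩; simp at hh), if_neg (by omega)]
          rw [harg]
          apply ih
          · intro hn
            by_cases hd : depth = 0
            · rw [if_pos hd] at hn; simp at hn
            · rw [if_neg hd] at hn; have := h1 hn; omega
          · intro hn
            by_cases hd : depth = 0
            · omega
            · rw [if_neg hd] at hn; have := h2 hn; omega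
        · by_cases hc : c = ')'
          · subst hc
            simp [splitA_go, pvEvts, splitB_scan]
            have hopB : (if op = none ∧ depth + -1 = 1 then some s else op) = op := by
              cases op with
              | none => have := h1 rfl; rw [if_neg (by rintro ⟨_, hh⟩; omega)]
              | some x => rw [if_neg (by rintro ⟨hh, _⟩; simp at hh)]
            rw [hopB]
            have hd' : depth + -1 = depth - 1 := by ring
            rw [hd']
            by_cases hz : depth - 1 = 0
            · rw [if_pos hz, if_pos hz]
              by_cases hi : s = n - 1 <;> simp [splitB_post, hi]
            · rw [if_neg hz, if_neg hz]
              apply ih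
              · intro hn; have := h1 hn; omega
              · intro hn; have := h2 hn; omega
          · simp only [splitA_go, pvEvts, if_neg hq, if_neg ho, if_neg hc]
            exact ih _ _ _ _ _ h1 h2

-- ===== VERDICT (by name: the statement is the Claim_ definition above) =====
theorem split_outer_call_py_spec : Claim_equal_split_outer_call_py := by
  intro text _
  unfold Spec_split_outer_call_py split_outer_call_py split_outer_call_py_alt
  cases hE : PySem.Str.endswith text ")" with
  | false => simp
  | true =>
    simp only [Bool.not_true, Bool.false_eq_true, if_false]
    have hev : splitB_events text.toList (splitB_mask text.toList false false)
        = pvEvts text.toList 0 false false := by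
      unfold splitB_events
      exact pvEvts_eq _ _ _ _
    rw [hev]
    exact splitA_go_eq text.toList (PySem.List.len text.toList) text.toList 0 false false 0 none
      (fun _ => le_refl 0) (fun hn => absurd rfl hn)
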